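-- pv_equiv track=rewrite | github.com/ellen24k/Algorithm | Python3/프로그래머스/0/181837. 커피 심부름/커피 심부름.py | solution
-- ===== SOURCE A (Python) =====
-- def solution(order):
--     answer = 0
--     price = {'cafelatte': 5000, 'americano': 4500}
--     for each_order in order:
--         if each_order in ["icecafelatte", "cafelatteice", "hotcafelatte", "cafelattehot", "cafelatte"]:
--             answer += price['cafelatte']
--         else:
--             answer += price['americano']
--     return answer
-- ===== SOURCE B (Python) =====
-- def solution(order):
--     variants = ["icecafelatte", "cafelatteice", "hotcafelatte", "cafelattehot", "cafelatte"]
--     latte_total = sum(order.count(v) for v in variants)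
--     return 4500 * len(order) + 500 * latte_total
-- ===== Notes on version B (the rewrite author's own statement) =====
-- stated objective: alternative
-- what changed: Instead of a per-element membership-test loop with branch-and-accumulate from a price dict, B iterates over the five fixed latte variant strings, counts each variant's occurrences in the order list, and returns the closed form 4500*len(order) + 500*latte_total.
import Mathlib
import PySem

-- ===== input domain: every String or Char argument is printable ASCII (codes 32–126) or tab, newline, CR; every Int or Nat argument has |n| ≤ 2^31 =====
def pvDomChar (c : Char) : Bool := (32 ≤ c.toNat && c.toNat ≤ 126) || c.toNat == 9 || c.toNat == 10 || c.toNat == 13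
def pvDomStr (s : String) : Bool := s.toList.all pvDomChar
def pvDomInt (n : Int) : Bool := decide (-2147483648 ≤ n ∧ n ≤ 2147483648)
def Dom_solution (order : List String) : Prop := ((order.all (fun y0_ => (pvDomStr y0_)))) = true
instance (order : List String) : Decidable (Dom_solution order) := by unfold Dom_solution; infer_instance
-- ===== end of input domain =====

-- B replaces A's per-element membership branch with counting each of the five variant strings in the list and a closed form; alternative decomposition, same cost.
-- ===== PORT A =====
def lattes : List String := ["icecafelatte", "cafelatteice", "hotcafelatte", "cafelattehot", "cafelatte"]

def price : PySem.Dict String Int := (PySem.Dict.empty.insert "cafelatte" 5000).insert "americano" 4500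

def solution (order : List String) : Int :=
  order.foldl (fun answer each_order =>
    if each_order ∈ lattes then
      answer + price.getD "cafelatte" 0
    else
      answer + price.getD "americano" 0) 0

-- ===== PORT B =====
def variants : List String := ["icecafelatte", "cafelatteice", "hotcafelatte", "cafelattehot", "cafelatte"]

def solution_alt (order : List String) : Int :=
  let latteTotal : Int := (variants.map (fun v => (PySem.List.count order v : Int))).sum
  4500 * (order.length : Int) + 500 * latteTotal

-- ===== PRECONDITION & SPEC =====
def Spec_solution (order : List String) (out : Int) : Prop := out = solution_alt order
instance (order : List String) (out : Int) : Decidable (Spec_solution order out) := by unfold Spec_solution; infer_instance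

-- ===== CLAIM =====
def Claim_equal_solution : Prop := ∀ (order : List String), Dom_solution order → Spec_solution order (solution order)

-- ===== LEMMAS AND PROOFS =====

theorem keyA (order : List String) (a : Int) :
    order.foldl (fun answer each_order =>
      if each_order ∈ lattes then
        answer + price.getD "cafelatte" 0
      else
        answer + price.getD "americano" 0) a
    = a + 4500 * (order.length : Int) + 500 * ((order.countP (fun o => decide (o ∈ lattes))) : Int) := by
  induction order generalizing a with
  | nil => simp
  | cons h t ih =>
    simp only [List.foldl_cons, List.countP_cons]
    by_cases hm : h ∈ lattes
    · rw [if_pos hm]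
      simp only [hm, decide_true, ih]
      have : price.getD "cafelatte" 0 = 5000 := by decide
      rw [this]
      push_cast [List.length_cons]
      ring
    · rw [if_neg hm]
      simp only [hm, decide_false, ih]
      have : price.getD "americano" 0 = 4500 := by decide
      rw [this]
      push_cast [List.length_cons]
      ring

theorem sum_ones (h : String) (vs : List String) (hn : vs.Nodup) :
    (vs.map (fun v => if h = v then (1 : Int) else 0)).sum = if h ∈ vs then 1 else 0 := by
  induction vs with
  | nil => simp
  | cons w ws ihw =>
    have hnw : ws.Nodup := hn.of_cons
    by_cases hw : h = w
    · subst hw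
      have hni : h ∉ ws := (List.nodup_cons.mp hn).1
      have hz : (ws.map (fun v => if h = v then (1 : Int) else 0)).sum = 0 := by
        apply List.sum_eq_zero
        intro x hx
        rcases List.mem_map.mp hx with ⟨v, hv, rfl⟩
        have : h ≠ v := fun e => hni (e ▸ hv)
        simp [this]
      simp [hz]
    · simp only [List.map_cons, List.sum_cons, if_neg hw, ihw hnw, zero_add]
      by_cases hm : h ∈ ws
      · simp [hm, List.mem_cons, hw]
      · simp [hm, List.mem_cons, hw]

theorem keyB (vs : List String) (hn : vs.Nodup) (order : List String) :
    (vs.map (fun v => ((order.count v : Nat) : Int))).sum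
    = ((order.countP (fun o => decide (o ∈ vs))) : Int) := by
  induction order with
  | nil => simp
  | cons h t ih =>
    simp only [List.countP_cons]
    have hsplit : (vs.map (fun v => (((h :: t).count v : Nat) : Int))).sum
        = (vs.map (fun v => ((t.count v : Nat) : Int))).sum
          + (vs.map (fun v => if h = v then (1 : Int) else 0)).sum := by
      rw [← List.sum_map_add]
      apply congrArg
      apply List.map_congr_left
      intro v _
      by_cases hv : h = v
      · subst hv; simp [List.count_cons]
      · have hvh : ¬ (v = h) := fun e => hv e.symm
        simp [List.count_cons, hvh, hv]
    rw [hsplit, ih, sum_ones h vs hn]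
    by_cases hm : h ∈ vs
    · simp [hm]
    · simp [hm]

-- ===== VERDICT =====
theorem solution_spec : Claim_equal_solution := by
  intro order _
  unfold Spec_solution solution solution_alt
  rw [keyA]
  have hn : variants.Nodup := by decide
  have hc : PySem.List.count = fun (xs : List String) v => xs.count v := by
    funext xs v; exact PySem.List.count_eq xs v
  simp only [hc]
  rw [keyB variants hn order]
  have : (fun o => decide (o ∈ variants)) = (fun o => decide (o ∈ lattes)) := rfl
  rw [this]
  ring
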